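-- pv_equiv track=rewrite | github.com/lizTheDeveloper/comment_reader | instagram_comment_parser.py | split_into_comment_blocks
-- ===== SOURCE A (Python) =====
-- from typing import List, Dict, Tuple
--
-- def split_into_comment_blocks(text: str) -> List[List[str]]:
--     """Split the text into individual comment blocks."""
--     lines = text.split('\n')
--     comment_blocks = []
--     current_block = []
--
--     for line in lines:
--         # Start of a new comment (profile picture line)
--         if '[![' in line and 'profile picture' in line:
--             if current_block:
--                 comment_blocks.append(current_block)
--             current_block = [line]
--         else:
--             if current_block:  # Only add to block if we've started one
--                 current_block.append(line)
--
--     # Don't forget the last block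
--     if current_block:
--         comment_blocks.append(current_block)
--
--     return comment_blocks
-- ===== SOURCE B (Python) =====
-- def _is_marker(line):
--     return '[![' in line and 'profile picture' in line
--
-- def split_into_comment_blocks(text):
--     """Split the text into comment blocks: slice lines between marker-line indices."""
--     lines = text.split('\n')
--     marks = [i for i, line in enumerate(lines) if _is_marker(line)]
--     return [lines[a:b] for a, b in zip(marks, marks[1:] + [len(lines)])]
-- ===== Notes on version B (the rewrite author's own statement) =====
-- stated objective: alternative
-- what changed: Replaces A's single fold that threads a growing current-block accumulator with a two-phase decomposition: first collect the indices of all marker lines via enumerate, then return the slices of the line list between consecutive marker indices (last slice runs to the end).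
import Mathlib
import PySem

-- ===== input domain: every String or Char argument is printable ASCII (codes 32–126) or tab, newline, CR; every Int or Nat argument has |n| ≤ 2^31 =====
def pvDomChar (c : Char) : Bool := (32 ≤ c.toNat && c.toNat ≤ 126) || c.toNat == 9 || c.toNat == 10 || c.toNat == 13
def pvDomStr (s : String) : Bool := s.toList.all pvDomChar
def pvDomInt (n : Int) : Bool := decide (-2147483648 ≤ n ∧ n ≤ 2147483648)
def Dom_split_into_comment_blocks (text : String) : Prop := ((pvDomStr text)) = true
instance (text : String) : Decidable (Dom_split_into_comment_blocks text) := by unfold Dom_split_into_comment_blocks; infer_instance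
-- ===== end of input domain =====

-- B replaces A's running-block accumulator by collecting the marker-line indices once and
-- slicing the line list between consecutive marker indices (objective: alternative decomposition).

-- ===== PORT A =====
-- literal transliteration of A: one fold over the lines carrying (comment_blocks, current_block)
def split_into_comment_blocks (text : String) : List (List String) :=
  let lines := (PySem.Chars.splitOn text.toList ['\n']).map String.ofList
  let st := lines.foldl
    (fun (st : List (List String) × List String) line =>
      if PySem.Str.isIn "[![" line && PySem.Str.isIn "profile picture" line then
        (if st.2.isEmpty then st.1 else st.1 ++ [st.2], [line])
      else
        (st.1, if st.2.isEmpty then st.2 else st.2 ++ [line]))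
    ([], [])
  if st.2.isEmpty then st.1 else st.1 ++ [st.2]

-- ===== PORT B =====
def pvMarker (line : String) : Bool :=
  PySem.Str.isIn "[![" line && PySem.Str.isIn "profile picture" line

-- literal transliteration of Source B: marker indices via enumerate, then slices between them
def split_into_comment_blocks_alt (text : String) : List (List String) :=
  let lines := (PySem.Chars.splitOn text.toList ['\n']).map String.ofList
  let marks := ((PySem.List.enumerate lines).filter (fun p => pvMarker p.2)).map (fun p => p.1)
  (marks.zip (PySem.List.slice marks (some 1) none ++ [PySem.List.len lines])).map
    (fun ab => PySem.List.slice lines (some ab.1) (some ab.2))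

-- ===== PRECONDITION & SPEC =====
def Spec_split_into_comment_blocks (text : String) (out : List (List String)) : Prop := out = split_into_comment_blocks_alt text
instance (text : String) (out : List (List String)) : Decidable (Spec_split_into_comment_blocks text out) := by unfold Spec_split_into_comment_blocks; infer_instance

-- ===== CLAIM (what is proved, stated in full; the proofs are below) =====
def Claim_equal_split_into_comment_blocks : Prop := ∀ (text : String), Dom_split_into_comment_blocks text → Spec_split_into_comment_blocks text (split_into_comment_blocks text)

-- ===== LEMMAS AND PROOFS =====

-- common specification: the blocks, defined by structural recursion on the line list
def pvBWith (cur : List String) : List String → List (List String)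
  | [] => [cur]
  | l :: ls => if pvMarker l then cur :: pvBWith [l] ls else pvBWith (cur ++ [l]) ls

def pvBNone : List String → List (List String)
  | [] => []
  | l :: ls => if pvMarker l then pvBWith [l] ls else pvBNone ls

-- marker indices as naturals, structurally
def pvNMarks : List String → List Nat
  | [] => []
  | l :: ls => if pvMarker l then 0 :: (pvNMarks ls).map (· + 1) else (pvNMarks ls).map (· + 1)

-- B's computation rephrased over naturals
def pvNB (lines : List String) : List (List String) :=
  ((pvNMarks lines).zip ((pvNMarks lines).drop 1 ++ [lines.length])).map
    (fun ab => (lines.drop ab.1).take (ab.2 - ab.1))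

-- A's loop body and final flush, named for the proofs
def pvStep (st : List (List String) × List String) (line : String) :
    List (List String) × List String :=
  if pvMarker line then
    (if st.2.isEmpty then st.1 else st.1 ++ [st.2], [line])
  else
    (st.1, if st.2.isEmpty then st.2 else st.2 ++ [line])

def pvFlush (st : List (List String) × List String) : List (List String) :=
  if st.2.isEmpty then st.1 else st.1 ++ [st.2]

lemma pvA_fold (ls : List String) : ∀ (acc : List (List String)) (cur : List String),
    pvFlush (ls.foldl pvStep (acc, cur))
    = if cur.isEmpty then acc ++ pvBNone ls else acc ++ pvBWith cur ls := by
  induction ls with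
  | nil => intro acc cur; cases cur <;> simp [pvFlush, pvBNone, pvBWith]
  | cons l ls ih =>
    intro acc cur
    simp only [List.foldl_cons]
    by_cases hm : pvMarker l <;> cases cur <;>
      simp [pvStep, hm, ih, pvBNone, pvBWith]

lemma pvBWith_eq (ls : List String) : ∀ cur, pvBWith cur ls =
    (cur ++ ls.takeWhile (fun l => !pvMarker l)) :: pvBNone (ls.dropWhile (fun l => !pvMarker l)) := by
  induction ls with
  | nil => intro cur; simp [pvBWith, pvBNone]
  | cons l ls ih =>
    intro cur
    by_cases hm : pvMarker l <;> simp [pvBWith, hm, ih, pvBNone]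

lemma pvBNone_dropWhile (ls : List String) :
    pvBNone (ls.dropWhile (fun l => !pvMarker l)) = pvBNone ls := by
  induction ls with
  | nil => rfl
  | cons l ls ih =>
    by_cases hm : pvMarker l <;> simp [hm, pvBNone, ih]

lemma pvNMarks_nil (ls : List String) (h : pvNMarks ls = []) :
    ls.takeWhile (fun l => !pvMarker l) = ls ∧ ls.dropWhile (fun l => !pvMarker l) = [] := by
  induction ls with
  | nil => simp
  | cons l ls ih =>
    by_cases hm : pvMarker l
    · simp [pvNMarks, hm] at h
    · simp [pvNMarks, hm] at h
      obtain ⟨h1, h2⟩ := ih h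
      simp [hm, h1, h2]

lemma pvNMarks_head (ls : List String) : ∀ j rest, pvNMarks ls = j :: rest →
    ls.take j = ls.takeWhile (fun l => !pvMarker l) := by
  induction ls with
  | nil => intro j rest h; simp [pvNMarks] at h
  | cons l ls ih =>
    intro j rest h
    by_cases hm : pvMarker l
    · simp [pvNMarks, hm] at h
      simp [h.1, hm]
    · simp only [pvNMarks] at h
      rw [if_neg hm] at h
      cases hnm : pvNMarks ls with
      | nil => rw [hnm] at h; simp at h
      | cons j' rest' =>
        rw [hnm, List.map_cons] at h
        injection h with h1 h2
        rw [← h1]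
        simp [hm, ih j' rest' hnm]

-- shifting all indices by one and consing a line leaves the slices unchanged
lemma pvShift (l : String) (ls : List String) (xs ys : List Nat) :
    ((xs.map (· + 1)).zip ((ys.map (· + 1)))).map
      (fun ab => ((l :: ls).drop ab.1).take (ab.2 - ab.1))
    = (xs.zip ys).map (fun ab => (ls.drop ab.1).take (ab.2 - ab.1)) := by
  rw [List.zip_map, List.map_map]
  apply List.map_congr_left
  intro ⟨a, b⟩ _
  simp [Nat.succ_sub_succ]

lemma pvNB_eq_bNone (ls : List String) : pvNB ls = pvBNone ls := by
  induction ls with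
  | nil => rfl
  | cons l ls ih =>
    by_cases hm : pvMarker l
    · cases hnm : pvNMarks ls with
      | nil =>
        obtain ⟨h1, h2⟩ := pvNMarks_nil ls hnm
        unfold pvNB
        simp only [pvNMarks, hm, if_true, hnm]
        simp only [pvBNone, hm, if_true, pvBWith_eq, h1, h2]
        simp
      | cons j rest =>
        have htw := pvNMarks_head ls j rest hnm
        have htail : (((j :: rest).map (· + 1)).zip ((rest ++ [ls.length]).map (· + 1))).map
            (fun ab => ((l :: ls).drop ab.1).take (ab.2 - ab.1)) = pvNB ls := by
          rw [pvShift]; unfold pvNB; rw [hnm]; simp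
        calc ((pvNMarks (l :: ls)).zip ((pvNMarks (l :: ls)).drop 1 ++ [(l :: ls).length])).map
              (fun ab => ((l :: ls).drop ab.1).take (ab.2 - ab.1))
            = ((0 :: (j :: rest).map (· + 1)).zip (((j :: rest).map (· + 1)) ++ [ls.length + 1])).map
              (fun ab => ((l :: ls).drop ab.1).take (ab.2 - ab.1)) := by
              simp [pvNMarks, hm, hnm]
          _ = ((l :: ls).take (j + 1)) :: (((j :: rest).map (· + 1)).zip ((rest.map (· + 1)) ++ [ls.length + 1])).map
              (fun ab => ((l :: ls).drop ab.1).take (ab.2 - ab.1)) := by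
              simp [List.cons_append, List.zip_cons_cons]
          _ = ((l :: ls).take (j + 1)) :: pvNB ls := by
              rw [← htail]; congr 2; simp
          _ = pvBNone (l :: ls) := by
              rw [ih, ← pvBNone_dropWhile ls, List.take_succ_cons]
              simp [pvBNone, hm, pvBWith_eq, ← htw]
    · have h1 : pvNMarks (l :: ls) = (pvNMarks ls).map (· + 1) := by simp [pvNMarks, hm]
      calc pvNB (l :: ls)
          = (((pvNMarks ls).map (· + 1)).zip (((pvNMarks ls).drop 1 ++ [ls.length]).map (· + 1))).map
              (fun ab => ((l :: ls).drop ab.1).take (ab.2 - ab.1)) := by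
            unfold pvNB; rw [h1]; congr 1; simp
        _ = pvNB ls := by rw [pvShift]; rfl
        _ = pvBNone (l :: ls) := by rw [ih]; simp [pvBNone, hm]

-- the Int-index marks of B's port are the natural marks, cast
lemma pvMarks_cast (ls : List String) : ∀ (s : Int),
    ((PySem.List.enumerate ls s).filter (fun p => pvMarker p.2)).map (fun p => p.1)
    = (pvNMarks ls).map (fun (n : Nat) => (n : Int) + s) := by
  induction ls with
  | nil => intro s; simp [PySem.List.enumerate_nil, pvNMarks]
  | cons l ls ih =>
    intro s
    have key : (pvNMarks ls).map (fun (n : Nat) => (n : Int) + (s + 1))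
        = ((pvNMarks ls).map (· + 1)).map (fun (n : Nat) => (n : Int) + s) := by
      rw [List.map_map]
      apply List.map_congr_left
      intro n _
      simp only [Function.comp]
      push_cast
      ring
    rw [PySem.List.enumerate_cons]
    by_cases hm : pvMarker l <;>
      simp [hm, ih (s + 1), pvNMarks, key]

lemma pvAlt_gen (ls : List String) :
    (((((PySem.List.enumerate ls).filter (fun p => pvMarker p.2)).map (fun p => p.1)).zip
        (PySem.List.slice ((((PySem.List.enumerate ls).filter (fun p => pvMarker p.2)).map (fun p => p.1))) (some 1) none
          ++ [PySem.List.len ls])).map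
      (fun ab => PySem.List.slice ls (some ab.1) (some ab.2))) = pvNB ls := by
  have hm : ((PySem.List.enumerate ls).filter (fun p => pvMarker p.2)).map (fun p => p.1)
      = (pvNMarks ls).map (fun (n : Nat) => (n : Int)) := by
    have h0 := pvMarks_cast ls 0
    simpa using h0
  rw [hm, PySem.List.slice_from_one, PySem.List.len_eq]
  have htail : ((pvNMarks ls).map (fun (n : Nat) => (n : Int))).tail ++ [(ls.length : Int)]
      = ((pvNMarks ls).drop 1 ++ [ls.length]).map (fun (n : Nat) => (n : Int)) := by
    simp [← List.drop_one, List.map_drop]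
  rw [htail, List.zip_map, List.map_map]
  unfold pvNB
  apply List.map_congr_left
  intro ⟨a, b⟩ hab
  simp only [Function.comp, Prod.map]
  rw [PySem.List.slice_natCast]

lemma pvAlt_eq_NB (text : String) :
    split_into_comment_blocks_alt text
    = pvNB ((PySem.Chars.splitOn text.toList ['\n']).map String.ofList) := by
  unfold split_into_comment_blocks_alt
  exact pvAlt_gen _

-- ===== VERDICT (by name: the statement is the Claim_ definition above) =====
theorem split_into_comment_blocks_spec : Claim_equal_split_into_comment_blocks := by
  intro text _
  unfold Spec_split_into_comment_blocks
  rw [pvAlt_eq_NB, pvNB_eq_bNone]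
  show split_into_comment_blocks text = _
  have h : split_into_comment_blocks text
      = pvFlush (((PySem.Chars.splitOn text.toList ['\n']).map String.ofList).foldl pvStep ([], [])) := rfl
  rw [h, pvA_fold]
  simp
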